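-- pv_equiv track=rewrite | github.com/ayukyo/alltoolkit | Python/tracking_number_utils/mod.py | _check_ups_checksum
-- ===== SOURCE A (Python) =====
-- def _check_ups_checksum(tracking_number: str) -> bool:
--     """
--     验证UPS追踪号码校验位
--     1Z开头的18位追踪号码使用加权求和算法
--     """
--     if not tracking_number.startswith('1Z') or len(tracking_number) != 18:
--         return False
--
--     # UPS使用特殊的校验算法
--     total = 0
--     for i, char in enumerate(tracking_number[2:]):  # 跳过1Z前缀
--         if char.isdigit():
--             val = int(char)
--         else:
--             val = ord(char) - ord('A') + 10
--
--         # 偶数位权重为2，奇数位为1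
--         if i % 2 == 0:
--             val *= 2
--
--         total += val
--
--     check_digit = total % 10
--     return check_digit == 0
-- ===== SOURCE B (Python) =====
-- def _check_ups_checksum(tracking_number: str) -> bool:
--     if not tracking_number.startswith('1Z') or len(tracking_number) != 18:
--         return False
--
--     def val(c):
--         return int(c) if c.isdigit() else ord(c) - ord('A') + 10
--
--     def rem(s):
--         # consume the body two characters at a time (weight 2 then weight 1),
--         # folding into a running residue mod 10
--         if not s:
--             return 0
--         return (2 * val(s[0]) + val(s[1]) + rem(s[2:])) % 10
--
--     return rem(tracking_number[2:]) == 0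
-- ===== Notes on version B (the rewrite author's own statement) =====
-- stated objective: alternative
-- what changed: Replaced the single indexed foldl with an in-loop parity test by a recursive helper that consumes the 16-character body two characters at a time (weight 2 then weight 1) and keeps only a running residue mod 10 at every step, so there is no index, no parity branch and no full total.
import Mathlib
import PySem

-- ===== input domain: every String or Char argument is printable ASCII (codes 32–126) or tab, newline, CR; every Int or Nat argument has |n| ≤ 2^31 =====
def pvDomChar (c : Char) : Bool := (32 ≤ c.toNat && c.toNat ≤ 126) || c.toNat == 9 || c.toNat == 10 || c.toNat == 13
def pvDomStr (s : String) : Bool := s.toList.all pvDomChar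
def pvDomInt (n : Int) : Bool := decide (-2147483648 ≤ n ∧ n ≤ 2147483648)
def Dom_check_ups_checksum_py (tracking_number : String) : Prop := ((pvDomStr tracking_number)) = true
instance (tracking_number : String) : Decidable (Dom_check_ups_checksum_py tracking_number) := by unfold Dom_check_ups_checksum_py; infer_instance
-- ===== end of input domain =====

-- B replaces A's single indexed loop with its parity branch by a recursive helper consuming the body
-- two characters at a time while keeping only a running residue mod 10; alternative decomposition, same cost.

-- ===== PORT A =====
-- literal port of A: guard, then one fold over enumerate(tracking_number[2:]) with the parity branch
def check_ups_checksum_py (tracking_number : String) : Bool :=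
  if !(PySem.Str.startswith tracking_number "1Z") || (PySem.Str.len tracking_number != 18) then
    false
  else
    let total : Int :=
      (PySem.List.enumerate (PySem.List.slice tracking_number.toList (some 2) none) 0).foldl
        (fun total p =>
          let val : Int :=
            if PySem.Chars.isdigit p.2 then (p.2.toNat : Int) - 48
            else (p.2.toNat : Int) - 65 + 10
          let val := if PySem.Int.mod p.1 2 = 0 then val * 2 else val
          total + val) 0
    PySem.Int.mod total 10 = 0

-- ===== PORT B =====
-- B's helper val(c)
def upsVal (c : Char) : Int :=
  if PySem.Chars.isdigit c then (c.toNat : Int) - 48 else (c.toNat : Int) - 65 + 10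

-- B's helper rem(s): recursion two characters at a time, residue mod 10 at each step.
-- (The single-character case is unreachable from the entry: the body always has even length 16;
-- Python would raise there, Lean returns 0 to be total.)
def upsRem : List Char → Int
  | [] => 0
  | [_] => 0
  | c0 :: c1 :: rest => PySem.Int.mod (2 * upsVal c0 + upsVal c1 + upsRem rest) 10

def check_ups_checksum_py_alt (tracking_number : String) : Bool :=
  if !(PySem.Str.startswith tracking_number "1Z") || (PySem.Str.len tracking_number != 18) then
    false
  else
    upsRem (PySem.List.slice tracking_number.toList (some 2) none) = 0

-- ===== PRECONDITION & SPEC =====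
def Spec_check_ups_checksum_py (tracking_number : String) (out : Bool) : Prop := out = check_ups_checksum_py_alt tracking_number
instance (tracking_number : String) (out : Bool) : Decidable (Spec_check_ups_checksum_py tracking_number out) := by unfold Spec_check_ups_checksum_py; infer_instance

-- ===== CLAIM (what is proved, stated in full; the proofs are below) =====
def Claim_equal_check_ups_checksum_py : Prop := ∀ (tracking_number : String), Dom_check_ups_checksum_py tracking_number → Spec_check_ups_checksum_py tracking_number (check_ups_checksum_py tracking_number)

-- ===== LEMMAS AND PROOFS =====

-- a length-18 list destructured into its 18 elements
theorem list_len18 (l : List Char) (h : l.length = 18) :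
    ∃ a0 a1 a2 a3 a4 a5 a6 a7 a8 a9 a10 a11 a12 a13 a14 a15 a16 a17,
      l = [a0,a1,a2,a3,a4,a5,a6,a7,a8,a9,a10,a11,a12,a13,a14,a15,a16,a17] := by
  obtain ⟨a0, l, rfl⟩ : ∃ a t, l = a :: t := by
    cases l with | nil => simp at h | cons a t => exact ⟨a, t, rfl⟩
  obtain ⟨a1, l, rfl⟩ : ∃ a t, l = a :: t := by
    cases l with | nil => simp at h | cons a t => exact ⟨a, t, rfl⟩
  obtain ⟨a2, l, rfl⟩ : ∃ a t, l = a :: t := by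
    cases l with | nil => simp at h | cons a t => exact ⟨a, t, rfl⟩
  obtain ⟨a3, l, rfl⟩ : ∃ a t, l = a :: t := by
    cases l with | nil => simp at h | cons a t => exact ⟨a, t, rfl⟩
  obtain ⟨a4, l, rfl⟩ : ∃ a t, l = a :: t := by
    cases l with | nil => simp at h | cons a t => exact ⟨a, t, rfl⟩
  obtain ⟨a5, l, rfl⟩ : ∃ a t, l = a :: t := by
    cases l with | nil => simp at h | cons a t => exact ⟨a, t, rfl⟩
  obtain ⟨a6, l, rfl⟩ : ∃ a t, l = a :: t := by
    cases l with | nil => simp at h | cons a t => exact ⟨a, t, rfl⟩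
  obtain ⟨a7, l, rfl⟩ : ∃ a t, l = a :: t := by
    cases l with | nil => simp at h | cons a t => exact ⟨a, t, rfl⟩
  obtain ⟨a8, l, rfl⟩ : ∃ a t, l = a :: t := by
    cases l with | nil => simp at h | cons a t => exact ⟨a, t, rfl⟩
  obtain ⟨a9, l, rfl⟩ : ∃ a t, l = a :: t := by
    cases l with | nil => simp at h | cons a t => exact ⟨a, t, rfl⟩
  obtain ⟨a10, l, rfl⟩ : ∃ a t, l = a :: t := by
    cases l with | nil => simp at h | cons a t => exact ⟨a, t, rfl⟩
  obtain ⟨a11, l, rfl⟩ : ∃ a t, l = a :: t := by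
    cases l with | nil => simp at h | cons a t => exact ⟨a, t, rfl⟩
  obtain ⟨a12, l, rfl⟩ : ∃ a t, l = a :: t := by
    cases l with | nil => simp at h | cons a t => exact ⟨a, t, rfl⟩
  obtain ⟨a13, l, rfl⟩ : ∃ a t, l = a :: t := by
    cases l with | nil => simp at h | cons a t => exact ⟨a, t, rfl⟩
  obtain ⟨a14, l, rfl⟩ : ∃ a t, l = a :: t := by
    cases l with | nil => simp at h | cons a t => exact ⟨a, t, rfl⟩
  obtain ⟨a15, l, rfl⟩ : ∃ a t, l = a :: t := by
    cases l with | nil => simp at h | cons a t => exact ⟨a, t, rfl⟩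
  obtain ⟨a16, l, rfl⟩ : ∃ a t, l = a :: t := by
    cases l with | nil => simp at h | cons a t => exact ⟨a, t, rfl⟩
  obtain ⟨a17, l, rfl⟩ : ∃ a t, l = a :: t := by
    cases l with | nil => simp at h | cons a t => exact ⟨a, t, rfl⟩
  have hnil : l = [] := by simpa using h
  subst hnil
  exact ⟨a0,a1,a2,a3,a4,a5,a6,a7,a8,a9,a10,a11,a12,a13,a14,a15,a16,a17, rfl⟩

-- ===== VERDICT (by name: the statement is the Claim_ definition above) =====
theorem check_ups_checksum_py_spec : Claim_equal_check_ups_checksum_py := by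
  intro s _
  unfold Spec_check_ups_checksum_py
  unfold check_ups_checksum_py check_ups_checksum_py_alt
  by_cases h2 : PySem.Str.len s = 18
  · have hl : s.toList.length = 18 := by
      simp [PySem.Str.len_eq] at h2; exact_mod_cast h2
    obtain ⟨a0,a1,a2,a3,a4,a5,a6,a7,a8,a9,a10,a11,a12,a13,a14,a15,a16,a17, hEq⟩ :=
      list_len18 s.toList hl
    simp only [PySem.Str.startswith_eq, PySem.Str.len_eq, hEq]
    norm_num [pysem, PySem.Chars.startswith, PySem.List.slice, PySem.List.clampIdx,
      PySem.List.enumerate, List.foldl, upsRem, upsVal, List.map, List.sum,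
      List.take, List.drop, PySem.List.sliceIndices, List.range, List.range.loop, List.filterMap,
      show Int.toNat 2 = 2 from rfl,
      show Int.fmod 1 2 = 1 from rfl, show Int.fmod 2 2 = 0 from rfl, show Int.fmod 3 2 = 1 from rfl, show Int.fmod 4 2 = 0 from rfl, show Int.fmod 5 2 = 1 from rfl, show Int.fmod 6 2 = 0 from rfl, show Int.fmod 7 2 = 1 from rfl, show Int.fmod 8 2 = 0 from rfl, show Int.fmod 9 2 = 1 from rfl, show Int.fmod 10 2 = 0 from rfl, show Int.fmod 11 2 = 1 from rfl, show Int.fmod 12 2 = 0 from rfl, show Int.fmod 13 2 = 1 from rfl, show Int.fmod 14 2 = 0 from rfl, show Int.fmod 15 2 = 1 from rfl]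
    simp only [← ite_mul, ← mul_ite]
    generalize (if PySem.Chars.isdigit a2 = true then (a2.toNat : Int) - 48 else (a2.toNat : Int) - 65 + 10) = v2
    generalize (if PySem.Chars.isdigit a3 = true then (a3.toNat : Int) - 48 else (a3.toNat : Int) - 65 + 10) = v3
    generalize (if PySem.Chars.isdigit a4 = true then (a4.toNat : Int) - 48 else (a4.toNat : Int) - 65 + 10) = v4
    generalize (if PySem.Chars.isdigit a5 = true then (a5.toNat : Int) - 48 else (a5.toNat : Int) - 65 + 10) = v5
    generalize (if PySem.Chars.isdigit a6 = true then (a6.toNat : Int) - 48 else (a6.toNat : Int) - 65 + 10) = v6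
    generalize (if PySem.Chars.isdigit a7 = true then (a7.toNat : Int) - 48 else (a7.toNat : Int) - 65 + 10) = v7
    generalize (if PySem.Chars.isdigit a8 = true then (a8.toNat : Int) - 48 else (a8.toNat : Int) - 65 + 10) = v8
    generalize (if PySem.Chars.isdigit a9 = true then (a9.toNat : Int) - 48 else (a9.toNat : Int) - 65 + 10) = v9
    generalize (if PySem.Chars.isdigit a10 = true then (a10.toNat : Int) - 48 else (a10.toNat : Int) - 65 + 10) = v10
    generalize (if PySem.Chars.isdigit a11 = true then (a11.toNat : Int) - 48 else (a11.toNat : Int) - 65 + 10) = v11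
    generalize (if PySem.Chars.isdigit a12 = true then (a12.toNat : Int) - 48 else (a12.toNat : Int) - 65 + 10) = v12
    generalize (if PySem.Chars.isdigit a13 = true then (a13.toNat : Int) - 48 else (a13.toNat : Int) - 65 + 10) = v13
    generalize (if PySem.Chars.isdigit a14 = true then (a14.toNat : Int) - 48 else (a14.toNat : Int) - 65 + 10) = v14
    generalize (if PySem.Chars.isdigit a15 = true then (a15.toNat : Int) - 48 else (a15.toNat : Int) - 65 + 10) = v15
    generalize (if PySem.Chars.isdigit a16 = true then (a16.toNat : Int) - 48 else (a16.toNat : Int) - 65 + 10) = v16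
    generalize (if PySem.Chars.isdigit a17 = true then (a17.toNat : Int) - 48 else (a17.toNat : Int) - 65 + 10) = v17
    congr 1
    rw [decide_eq_decide]
    constructor <;> intro h <;> omega
  · have hsl : ¬((s.length : Int) = 18) := by simpa [PySem.Str.len_eq] using h2
    simp [hsl]
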